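-- pv_equiv track=rewrite | github.com/torresszy/Python_projects_samples | pa3/basic_algorithms.py | find_min_count
-- ===== SOURCE A (Python) =====
-- def count_tokens(tokens):
--     '''
--     Counts each distinct token (entity) in a list of tokens
--
--     Inputs:
--         tokens: list of tokens (must be immutable)
--
--     Returns: dictionary that maps tokens to counts
--     '''
--
--     count = {}
--
--     for token in tokens:
--         if token not in count:
--             count[token] = 1
--         else:
--             count[token] += 1
--
--     return count
--
-- def find_min_count(tokens, min_count):
--     '''
--     Find the tokens that occur *at least* min_count times
--
--     Inputs:
--         tokens: a list of tokens  (must be immutable)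
--         min_count: a non-negative integer
--
--     Returns: set of tokens
--     '''
--
--     #Error checking (DO NOT MODIFY)
--     if min_count < 0:
--         raise ValueError("min_count must be a non-negative integer")
--
--     count = count_tokens(tokens)
--     rv = set()
--
--     for i in count:
--         if count[i] >= min_count:
--             rv.add(i)
--
--     return rv
-- ===== SOURCE B (Python) =====
-- def find_min_count(tokens, min_count):
--     '''
--     Find the tokens that occur *at least* min_count times.
--
--     Different algorithm: no counting dictionary at all.  Repeatedly take the
--     first remaining token, strip ALL of its occurrences from the remaining
--     list in one comprehension, and read its count off as the length drop;
--     each distinct token is decided exactly once, in first-occurrence order.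
--     '''
--     if min_count < 0:
--         raise ValueError("min_count must be a non-negative integer")
--
--     rv = set()
--     rest = list(tokens)
--     while rest:
--         t = rest[0]
--         remaining = [x for x in rest if x != t]
--         if len(rest) - len(remaining) >= min_count:
--             rv.add(t)
--         rest = remaining
--     return rv
-- ===== Notes on version B (the rewrite author's own statement) =====
-- stated objective: alternative
-- what changed: Replaces A's counting dictionary plus a second scan over it with a dictionary-free partition loop: repeatedly take the first remaining token, remove all its occurrences in one pass, and use the length drop as its count, deciding each distinct token exactly once.
import Mathlib
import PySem

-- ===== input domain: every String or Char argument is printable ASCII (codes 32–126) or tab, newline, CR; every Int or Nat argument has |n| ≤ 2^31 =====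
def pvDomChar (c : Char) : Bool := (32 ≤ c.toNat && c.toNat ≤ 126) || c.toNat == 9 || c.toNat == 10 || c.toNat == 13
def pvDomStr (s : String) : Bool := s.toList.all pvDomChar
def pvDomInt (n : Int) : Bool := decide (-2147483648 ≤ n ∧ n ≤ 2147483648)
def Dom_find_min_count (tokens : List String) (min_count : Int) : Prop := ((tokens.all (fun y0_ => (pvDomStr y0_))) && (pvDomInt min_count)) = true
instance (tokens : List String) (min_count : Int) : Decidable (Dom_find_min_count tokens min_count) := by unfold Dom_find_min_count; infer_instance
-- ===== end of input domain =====

-- B drops A's counting dictionary entirely: it repeatedly takes the first remaining token,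
-- removes all its occurrences in one pass and uses the length drop as that token's count
-- (objective: alternative; not faster). Neither version mutates its arguments.

-- ===== PORT A =====
def count_tokens (tokens : List String) : PySem.Dict String Int :=
  tokens.foldl (fun count token =>
    if count.contains token = false then count.insert token 1
    else count.modify token 0 (· + 1)) PySem.Dict.empty

def find_min_count (tokens : List String) (min_count : Int) : List String :=
  -- the 'if min_count < 0: raise ValueError' guard is excluded by Pre_find_min_count
  let count := count_tokens tokens
  count.keys.foldl (fun rv i =>
    if count.getD i 0 ≥ min_count then PySem.Set.add rv i else rv) PySem.Set.empty

-- ===== PORT B =====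
-- the while loop of Source B: rest shrinks strictly (its head is always removed)
def fmcLoop (min_count : Int) (rv : List String) (rest : List String) : List String :=
  match rest with
  | [] => rv
  | t :: rs =>
    let remaining := (t :: rs).filter (fun x => x ≠ t)
    let rv' := if ((t :: rs).length : Int) - (remaining.length : Int) ≥ min_count
               then PySem.Set.add rv t else rv
    fmcLoop min_count rv' remaining
termination_by rest.length
decreasing_by
  simp only [List.filter_cons, decide_not, ne_eq, List.length_cons]
  exact Nat.lt_succ_of_le (List.length_filter_le _ _)

def find_min_count_alt (tokens : List String) (min_count : Int) : List String :=
  -- the same ValueError guard is excluded by Pre_find_min_count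
  fmcLoop min_count PySem.Set.empty tokens

-- ===== PRECONDITION & SPEC =====
-- Pre_ excludes exactly min_count < 0, where the Python A raises ValueError.
def Pre_find_min_count (tokens : List String) (min_count : Int) : Prop := 0 ≤ min_count
instance (tokens : List String) (min_count : Int) : Decidable (Pre_find_min_count tokens min_count) := by unfold Pre_find_min_count; infer_instance

def pvWitness_find_min_count : List String × Int := (["a", "b", "a"], 2)

def Spec_find_min_count (tokens : List String) (min_count : Int) (out : List String) : Prop := out = find_min_count_alt tokens min_count
instance (tokens : List String) (min_count : Int) (out : List String) : Decidable (Spec_find_min_count tokens min_count out) := by unfold Spec_find_min_count; infer_instance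

-- ===== CLAIM (what is proved, stated in full; the proofs are below) =====
def Claim_equal_find_min_count : Prop := ∀ (tokens : List String) (min_count : Int), Dom_find_min_count tokens min_count → Pre_find_min_count tokens min_count → Spec_find_min_count tokens min_count (find_min_count tokens min_count)

-- ===== LEMMAS AND PROOFS =====

-- the common value both programs compute: the distinct tokens of count ≥ min_count, in first-occurrence order
def fmcSpecVal (tokens : List String) (min_count : Int) : List String :=
  PySem.Set.ofList (tokens.filter (fun t => decide ((tokens.count t : Int) ≥ min_count)))

-- A's hand-written counting loop builds exactly Counter(tokens).
theorem count_tokens_eq_counter (tokens : List String) :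
    count_tokens tokens = PySem.Dict.counter tokens := by
  rw [count_tokens, PySem.Dict.counter_eq_foldl]
  apply List.foldl_ext
  intro d x _
  by_cases hc : d.contains x = true
  · simp [hc]
  · simp only [Bool.not_eq_true] at hc
    simp [hc, PySem.Dict.modify, PySem.Dict.getD_of_not_contains d 0 hc]

-- dedup-then-filter = filter-then-dedup (the predicate depends only on the element)
theorem ofList_filter_comm (p : String → Bool) (xs : List String) :
    PySem.Set.ofList (xs.filter p) = (PySem.Set.ofList xs).filter p := by
  induction xs with
  | nil => rfl
  | cons x xs ih =>
    rw [PySem.Set.ofList_cons, List.filter_cons]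
    by_cases hp : p x = true
    · rw [if_pos hp, PySem.Set.ofList_cons, ih, List.filter_cons, if_pos hp]
      simp only [PySem.Set.discard]
      rw [List.filter_comm]
    · have hself : List.filter (fun y => !(y == x)) (List.filter p (PySem.Set.ofList xs))
          = List.filter p (PySem.Set.ofList xs) := by
        apply List.filter_eq_self.mpr
        intro y hy
        have hpy := List.of_mem_filter hy
        have hyx : y ≠ x := fun h => hp (h ▸ hpy)
        simp [hyx]
      rw [if_neg hp, ih, List.filter_cons, if_neg hp]
      simp only [PySem.Set.discard]
      rw [List.filter_comm, hself]

-- A computes the common value (counter keys are the dedup, getD the counts).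
theorem find_min_count_eq_spec (tokens : List String) (min_count : Int) :
    find_min_count tokens min_count = fmcSpecVal tokens min_count := by
  rw [find_min_count, fmcSpecVal, count_tokens_eq_counter]
  simp only [PySem.Set.empty]
  rw [PySem.List.foldl_ite_eq_foldl_filter, ← PySem.Set.ofList_eq_foldl,
    PySem.Dict.keys_counter, ofList_filter_comm, ofList_filter_comm,
    PySem.Set.ofList_ofList]
  apply List.filter_congr
  intro t _
  simp [PySem.Dict.getD_counter]

-- the length drop of the partition step is exactly the head's multiplicity
theorem length_drop_eq_count (t : String) (l : List String) :
    (l.length : Int) - ((l.filter (fun x => x ≠ t)).length : Int) = (l.count t : Int) := by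
  have h : (l.filter (fun x => x ≠ t)).length + l.count t = l.length := by
    induction l with
    | nil => rfl
    | cons x xs ih =>
      simp only [ne_eq] at ih
      by_cases hx : x = t
      · subst hx
        rw [List.filter_cons, List.count_cons_self]
        simp only [ne_eq, not_true_eq_false, decide_false, Bool.false_eq_true, if_false,
          List.length_cons]
        omega
      · rw [List.filter_cons, List.count_cons_of_ne hx]
        simp only [ne_eq, hx, not_false_eq_true, decide_true, if_true, List.length_cons]
        omega
  omega

-- counts are preserved by removing a DIFFERENT token's occurrences
theorem count_filter_ne (t x : String) (l : List String) (hx : x ≠ t) :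
    (l.filter (fun y => y ≠ t)).count x = l.count x := by
  apply List.count_filter
  simp [hx]

-- the loop invariant: fmcLoop folds the qualifying dedup of rest onto rv
theorem fmcLoop_eq (min_count : Int) : ∀ (rest rv : List String),
    fmcLoop min_count rv rest = PySem.Set.update rv (fmcSpecVal rest min_count)
  | [], rv => by simp [fmcLoop, fmcSpecVal, PySem.Set.update]
  | t :: rs, rv => by
    rw [fmcLoop]
    have hrem : (t :: rs).filter (fun x => x ≠ t) = rs.filter (fun x => x ≠ t) := by
      simp
    have hlen := length_drop_eq_count t (t :: rs)
    rw [fmcLoop_eq min_count ((t :: rs).filter (fun x => x ≠ t))]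
    by_cases hp : ((t :: rs).count t : Int) ≥ min_count
    · -- t qualifies: it is added first, and the rest of the dedup agrees
      rw [if_pos (by rw [hlen]; exact hp)]
      have hspec : fmcSpecVal (t :: rs) min_count
          = t :: fmcSpecVal ((t :: rs).filter (fun x => x ≠ t)) min_count := by
        rw [fmcSpecVal, List.filter_cons, if_pos (by simpa using hp), PySem.Set.ofList_cons]
        congr 1
        simp only [PySem.Set.discard]
        rw [← ofList_filter_comm, hrem, fmcSpecVal]
        congr 1
        rw [List.filter_filter, List.filter_filter]
        apply List.filter_congr
        intro x hxmem
        by_cases hx : x = t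
        · subst hx; simp
        · have htx : ¬ t = x := fun h => hx (Eq.symm h)
          have hcnt : (t :: rs).count x = rs.count x := List.count_cons_of_ne htx
          rw [count_filter_ne t x rs hx]
          simp [hx, hcnt]
      rw [hspec]
      simp only [PySem.Set.update, List.foldl_cons]
    · -- t does not qualify: neither does any of its occurrences; the spec value is unchanged
      rw [if_neg (by rw [hlen]; exact hp)]
      have hspec : fmcSpecVal (t :: rs) min_count
          = fmcSpecVal ((t :: rs).filter (fun x => x ≠ t)) min_count := by
        rw [fmcSpecVal, List.filter_cons, if_neg (by simpa using hp), hrem, fmcSpecVal]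
        congr 1
        rw [List.filter_filter]
        apply List.filter_congr
        intro x hxmem
        by_cases hx : x = t
        · subst hx
          have h1 : ((rs.count x : Int)) + 1 < min_count := by
            rw [List.count_cons_self] at hp; push_cast at hp; omega
          simp only [List.count_cons_self]
          simp
          omega
        · have htx : ¬ t = x := fun h => hx (Eq.symm h)
          have hcnt : (t :: rs).count x = rs.count x := List.count_cons_of_ne htx
          rw [count_filter_ne t x rs hx]
          simp [hx, hcnt]
      rw [hspec]
  termination_by rest _ => rest.length
  decreasing_by
    simpa using Nat.lt_succ_of_le (List.length_filter_le _ rs)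

theorem find_min_count_alt_eq_spec (tokens : List String) (min_count : Int) :
    find_min_count_alt tokens min_count = fmcSpecVal tokens min_count := by
  rw [find_min_count_alt, fmcLoop_eq]
  simp only [PySem.Set.empty, PySem.Set.update, ← PySem.Set.ofList_eq_foldl]
  rw [fmcSpecVal, PySem.Set.ofList_ofList]

-- ===== VERDICT (by name: the statement is the Claim_ definition above) =====
theorem find_min_count_spec : Claim_equal_find_min_count := by
  intro tokens min_count _ _
  unfold Spec_find_min_count
  rw [find_min_count_eq_spec, find_min_count_alt_eq_spec]
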